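-- pv_equiv track=rewrite | github.com/jwalin-shah/tensor-logic | experiments/exp78_rule_induction.py | enumerate_rules
-- ===== SOURCE A (Python) =====
-- import itertools
--
-- def enumerate_rules(rel_names: list, max_len: int):
--     """All rule bodies of length 1..max_len as lists of relation names.
--
--     Each rel can appear as itself (forward) or transposed (reverse). We model
--     transpose by appending '^T' to the name; caller maps that to T.T.
--     """
--     candidates = []
--     primitives = []
--     for r in rel_names:
--         primitives.append(r)
--         primitives.append(r + "^T")
--     for k in range(1, max_len + 1):
--         for combo in itertools.product(primitives, repeat=k):
--             candidates.append(list(combo))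
--     return candidates
-- ===== SOURCE B (Python) =====
-- def enumerate_rules(rel_names: list, max_len: int):
--     """All rule bodies of length 1..max_len, built level by level: each
--     length-k level extends the length-(k-1) level on the right by one
--     primitive, instead of re-enumerating every length from scratch."""
--     prims = [x for r in rel_names for x in (r, r + "^T")]
--     result = []
--     if max_len >= 1:
--         level = [[p] for p in prims]
--         result.extend(level)
--         for _ in range(2, max_len + 1):
--             level = [body + [p] for body in level for p in prims]
--             result.extend(level)
--     return result
-- ===== Notes on version B (the rewrite author's own statement) =====
-- stated objective: alternative
-- what changed: Replaces the per-length itertools.product re-enumeration with a bottom-up level construction that extends each previous-level body by one primitive on the right, reusing the previous level instead of rebuilding every tuple from scratch.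
import Mathlib
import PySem

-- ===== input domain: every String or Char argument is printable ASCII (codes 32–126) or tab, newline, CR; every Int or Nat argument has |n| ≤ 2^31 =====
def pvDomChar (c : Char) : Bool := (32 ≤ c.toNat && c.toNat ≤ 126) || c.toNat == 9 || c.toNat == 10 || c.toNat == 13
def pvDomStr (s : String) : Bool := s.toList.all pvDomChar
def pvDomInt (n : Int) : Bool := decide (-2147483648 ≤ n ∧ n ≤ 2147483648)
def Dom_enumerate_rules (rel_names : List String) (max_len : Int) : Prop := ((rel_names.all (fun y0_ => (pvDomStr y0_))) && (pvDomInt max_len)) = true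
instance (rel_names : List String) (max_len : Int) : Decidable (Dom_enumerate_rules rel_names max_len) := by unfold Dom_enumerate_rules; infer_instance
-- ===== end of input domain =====

-- B builds the enumeration bottom-up level by level instead of calling a fresh
-- cartesian-product enumeration per length (objective: alternative decomposition).

-- ===== PORT A =====
-- itertools.product(prims, repeat=k): lexicographic order, leftmost position varies slowest
def pyProductRep (prims : List String) : Nat → List (List String)
  | 0 => [[]]
  | k + 1 => prims.flatMap (fun p => (pyProductRep prims k).map (fun c => p :: c))

def enumerate_rules (rel_names : List String) (max_len : Int) : List (List String) :=
  let primitives := rel_names.foldl (fun acc r => acc ++ [r, r ++ "^T"]) []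
  (PySem.List.pyRange 1 (max_len + 1) 1).foldl
    (fun candidates k => candidates ++ pyProductRep primitives k.toNat) []

-- ===== PORT B =====
-- emit the current level, then for each further length extend every body by one primitive
def bLoop (prims : List String) : Nat → List (List String) → List (List String)
  | 0, _ => []
  | n + 1, level =>
      let next := level.flatMap (fun body => prims.map (fun p => body ++ [p]))
      next ++ bLoop prims n next

def enumerate_rules_alt (rel_names : List String) (max_len : Int) : List (List String) :=
  let prims := rel_names.flatMap (fun r => [r, r ++ "^T"])
  if 1 ≤ max_len then
    let level := prims.map (fun p => [p])
    level ++ bLoop prims (max_len - 1).toNat level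
  else []

-- ===== PRECONDITION & SPEC =====
def Spec_enumerate_rules (rel_names : List String) (max_len : Int) (out : List (List String)) : Prop := out = enumerate_rules_alt rel_names max_len
instance (rel_names : List String) (max_len : Int) (out : List (List String)) : Decidable (Spec_enumerate_rules rel_names max_len out) := by unfold Spec_enumerate_rules; infer_instance

-- ===== CLAIM (what is proved, stated in full; the proofs are below) =====
def Claim_equal_enumerate_rules : Prop := ∀ (rel_names : List String) (max_len : Int), Dom_enumerate_rules rel_names max_len → Spec_enumerate_rules rel_names max_len (enumerate_rules rel_names max_len)

-- ===== LEMMAS AND PROOFS =====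

-- the tail-extension form of the repeated product (B's level step)
def tailProd (prims : List String) : Nat → List (List String)
  | 0 => [[]]
  | k + 1 => (tailProd prims k).flatMap (fun c => prims.map (fun p => c ++ [p]))

theorem flatMap_pure_singleton (l : List String) :
    l.flatMap (fun p => [[p]]) = l.map (fun p => [p]) := by
  induction l with
  | nil => rfl
  | cons h t ih => simp [List.flatMap_cons, ih]

theorem pyProductRep_eq_tailProd (prims : List String) (k : Nat) :
    pyProductRep prims k = tailProd prims k := by
  induction k with
  | zero => rfl
  | succ k ih =>
      have step : ∀ m, pyProductRep prims (m + 1)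
          = (pyProductRep prims m).flatMap (fun c => prims.map (fun p => c ++ [p])) := by
        intro m
        induction m with
        | zero =>
            simp [pyProductRep]
            exact flatMap_pure_singleton prims
        | succ m ihm =>
            conv_lhs => rw [pyProductRep, ihm]
            rw [pyProductRep]
            simp [List.flatMap_map, List.map_flatMap, List.flatMap_assoc, Function.comp_def]
      rw [step, ih]; rfl

theorem bLoop_tailProd (prims : List String) (n k : Nat) :
    bLoop prims n (tailProd prims (k + 1))
      = ((List.range n).map (fun i => tailProd prims (k + 2 + i))).flatten := by
  induction n generalizing k with
  | zero => rfl
  | succ n ih =>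
      have hnext : (tailProd prims (k + 1)).flatMap (fun body => prims.map (fun p => body ++ [p]))
          = tailProd prims (k + 2) := rfl
      have : bLoop prims (n + 1) (tailProd prims (k + 1))
          = tailProd prims (k + 2) ++ bLoop prims n (tailProd prims (k + 2)) := by
        rw [bLoop]; rw [hnext]
      rw [this, ih (k + 1), List.range_succ_eq_map]
      simp [List.map_map]
      congr 1
      apply List.map_congr_left
      intro i _
      congr 1
      omega

theorem foldl_prims (l : List String) (init : List String) :
    l.foldl (fun acc r => acc ++ [r, r ++ "^T"]) init
      = init ++ l.flatMap (fun r => [r, r ++ "^T"]) := by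
  induction l generalizing init with
  | nil => simp
  | cons r t ih => simp [List.foldl_cons, ih, List.flatMap_cons]

theorem foldl_append_range (f : Nat → List (List String)) (m : Nat) (init : List (List String)) :
    (List.range m).foldl (fun acc i => acc ++ f i) init
      = init ++ ((List.range m).map f).flatten := by
  induction m generalizing init with
  | zero => simp
  | succ m ih => rw [List.range_succ]; simp [ih]

theorem enumerate_rules_spec : Claim_equal_enumerate_rules := by
  intro rel_names max_len _
  unfold Spec_enumerate_rules enumerate_rules enumerate_rules_alt
  dsimp only
  rw [foldl_prims, List.nil_append, PySem.List.pyRange_one]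
  have hm : (max_len + 1 - 1).toNat = max_len.toNat := by omega
  rw [hm, List.foldl_map]
  set prims := rel_names.flatMap (fun r => [r, r ++ "^T"]) with hp
  rw [foldl_append_range (fun i => pyProductRep prims ((1 : Int) + i).toNat) max_len.toNat []]
  rw [List.nil_append]
  have hA : ((List.range max_len.toNat).map
        (fun i : Nat => pyProductRep prims ((1 : Int) + (i : Int)).toNat)).flatten
      = ((List.range max_len.toNat).map (fun i => tailProd prims (1 + i))).flatten := by
    congr 1
    apply List.map_congr_left
    intro i _
    rw [pyProductRep_eq_tailProd]
    have h1 : ((1 : Int) + (i : Int)).toNat = 1 + i := by omega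
    rw [h1]
  rw [hA]
  by_cases hpos : 1 ≤ max_len
  · rw [if_pos hpos]
    have hinit : prims.map (fun p => [p]) = tailProd prims 1 := by
      simp [tailProd]
    rw [hinit, bLoop_tailProd prims (max_len - 1).toNat 0]
    have hsplit : max_len.toNat = (max_len - 1).toNat + 1 := by omega
    rw [hsplit, List.range_succ_eq_map]
    simp [List.map_map]
    congr 1
    apply List.map_congr_left
    intro i _
    simp only [Function.comp_apply]
    congr 1
    omega
  · rw [if_neg hpos]
    have h0 : max_len.toNat = 0 := by omega
    rw [h0]
    rfl
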